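-- pv_equiv track=rewrite | github.com/dfrechiani/redato | backend/notamil-backend/scripts/validation/build_validation_sets.py | _band_breakdown
-- ===== SOURCE A (Python) =====
-- from typing import Any, Dict, List, Tuple
--
-- BANDS: List[Tuple[str, int, int, int]] = [
--     ("200-399", 200, 399, 30),
--     ("400-599", 400, 599, 50),
--     ("600-799", 600, 799, 60),
--     ("800-999", 800, 999, 40),
--     ("1000",    1000, 1000, 20),
-- ]
--
-- def _band_breakdown(records: List[Dict[str, Any]]) -> Dict[str, int]:
--     out = {band: 0 for band, _, _, _ in BANDS}
--     for r in records:
--         n = int(r["nota_global"])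
--         for band, lo, hi, _ in BANDS:
--             if lo <= n <= hi:
--                 out[band] += 1
--                 break
--     return out
-- ===== SOURCE B (Python) =====
-- # B: arithmetic band mapping instead of scanning BANDS per record; same result, no inner scan.
-- def _band_breakdown(records):
--     names = ["200-399", "400-599", "600-799", "800-999", "1000"]
--     out = dict.fromkeys(names, 0)
--     for r in records:
--         n = int(r["nota_global"])
--         if 200 <= n <= 999:
--             out[names[(n - 200) // 200]] += 1
--         elif n == 1000:
--             out["1000"] += 1
--     return out
-- ===== Notes on version B (the rewrite author's own statement) =====
-- stated objective: simpler
-- what changed: Replaces the per-record scan over the BANDS table (loop with break) by a direct arithmetic computation of the band index ((n-200)//200 for 200<=n<=999, plus the n==1000 case) into a pre-initialised dict of band names.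
import Mathlib
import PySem

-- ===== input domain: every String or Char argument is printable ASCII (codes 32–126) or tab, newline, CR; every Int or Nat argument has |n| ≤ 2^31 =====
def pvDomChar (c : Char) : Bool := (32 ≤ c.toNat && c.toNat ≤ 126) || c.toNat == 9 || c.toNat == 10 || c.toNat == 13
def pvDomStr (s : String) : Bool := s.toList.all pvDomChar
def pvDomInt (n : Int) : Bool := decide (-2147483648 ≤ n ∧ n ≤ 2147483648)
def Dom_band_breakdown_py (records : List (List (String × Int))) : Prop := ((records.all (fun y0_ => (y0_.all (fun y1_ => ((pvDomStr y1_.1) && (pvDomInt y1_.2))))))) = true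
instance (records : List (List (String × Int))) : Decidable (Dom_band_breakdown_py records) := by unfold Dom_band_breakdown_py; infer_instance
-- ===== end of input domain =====

-- B replaces A's inner scan over BANDS with an arithmetic index into the band names (objective: simpler).

-- ===== PORT A =====
-- BANDS constant from the module
def pvBANDS : List (String × Int × Int × Int) :=
  [("200-399", 200, 399, 30), ("400-599", 400, 599, 50), ("600-799", 600, 799, 60),
   ("800-999", 800, 999, 40), ("1000", 1000, 1000, 20)]

-- inner 'for band, lo, hi, _ in BANDS: if lo <= n <= hi: out[band] += 1; break'
def pvInnerA (n : Int) (out : PySem.Dict String Int) : List (String × Int × Int × Int) → PySem.Dict String Int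
  | [] => out
  | (band, lo, hi, _) :: rest =>
      if lo ≤ n ∧ n ≤ hi then out.modify band 0 (· + 1) else pvInnerA n out rest

def band_breakdown_py (records : List (List (String × Int))) : List (String × Int) :=
  let init := pvBANDS.foldl (fun d b => d.insert b.1 0) PySem.Dict.empty
  (records.foldl (fun out r =>
      match (PySem.Dict.mk r).get? "nota_global" with
      | some n => pvInnerA n out pvBANDS
      | none => out) init).items   -- none is a KeyError in Python; excluded by Pre_

-- ===== PORT B =====
def pvNames : List String := ["200-399", "400-599", "600-799", "800-999", "1000"]

def band_breakdown_py_alt (records : List (List (String × Int))) : List (String × Int) :=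
  let init := pvNames.foldl (fun d k => d.insert k 0) PySem.Dict.empty   -- dict.fromkeys(names, 0)
  (records.foldl (fun out r =>
      match (PySem.Dict.mk r).get? "nota_global" with
      | some n =>
          if 200 ≤ n ∧ n ≤ 999 then
            match PySem.List.pyGet? pvNames (PySem.Int.floordiv (n - 200) 200) with
            | some k => out.modify k 0 (· + 1)
            | none => out   -- unreachable: index is 0..3
          else if n = 1000 then out.modify "1000" 0 (· + 1)
          else out
      | none => out) init).items   -- none is a KeyError in Python; excluded by Pre_

-- ===== PRECONDITION & SPEC =====
-- Pre_ excludes records missing the key "nota_global", on which A raises KeyError.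
def Pre_band_breakdown_py (records : List (List (String × Int))) : Prop :=
  ∀ r ∈ records, "nota_global" ∈ r.map Prod.fst
instance (records : List (List (String × Int))) : Decidable (Pre_band_breakdown_py records) := by unfold Pre_band_breakdown_py; infer_instance

def pvWitness_band_breakdown_py : (List (List (String × Int))) :=
  [[("nota_global", 250)], [("nota_global", 1000), ("x", 3)]]

def Spec_band_breakdown_py (records : List (List (String × Int))) (out : List (String × Int)) : Prop := out = band_breakdown_py_alt records
instance (records : List (List (String × Int))) (out : List (String × Int)) : Decidable (Spec_band_breakdown_py records out) := by unfold Spec_band_breakdown_py; infer_instance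

-- ===== CLAIM (what is proved, stated in full; the proofs are below) =====
def Claim_equal_band_breakdown_py : Prop := ∀ (records : List (List (String × Int))), Dom_band_breakdown_py records → Pre_band_breakdown_py records → Spec_band_breakdown_py records (band_breakdown_py records)

-- ===== LEMMAS AND PROOFS =====

theorem pv_step_eq (out : PySem.Dict String Int) (n : Int) :
    pvInnerA n out pvBANDS =
      (if 200 ≤ n ∧ n ≤ 999 then
        match PySem.List.pyGet? pvNames (PySem.Int.floordiv (n - 200) 200) with
        | some k => out.modify k 0 (· + 1)
        | none => out
      else if n = 1000 then out.modify "1000" 0 (· + 1)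
      else out) := by
  by_cases h1 : 200 ≤ n ∧ n ≤ 399
  · have hidx : PySem.List.pyGet? pvNames ((n - 200) / 200) = some "200-399" := by
      rw [show (n - 200) / 200 = 0 by omega]; decide
    simp [pvInnerA, pvBANDS, hidx, h1, show 200 ≤ n ∧ n ≤ 999 by omega]
  · by_cases h2 : 400 ≤ n ∧ n ≤ 599
    · have hidx : PySem.List.pyGet? pvNames ((n - 200) / 200) = some "400-599" := by
        rw [show (n - 200) / 200 = 1 by omega]; decide
      simp [pvInnerA, pvBANDS, hidx, h2, show ¬ n ≤ 399 by omega,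
        show 200 ≤ n ∧ n ≤ 999 by omega]
    · by_cases h3 : 600 ≤ n ∧ n ≤ 799
      · have hidx : PySem.List.pyGet? pvNames ((n - 200) / 200) = some "600-799" := by
          rw [show (n - 200) / 200 = 2 by omega]; decide
        simp [pvInnerA, pvBANDS, hidx, h3, show ¬ n ≤ 399 by omega,
          show ¬ n ≤ 599 by omega, show 200 ≤ n ∧ n ≤ 999 by omega]
      · by_cases h4 : 800 ≤ n ∧ n ≤ 999
        · have hidx : PySem.List.pyGet? pvNames ((n - 200) / 200) = some "800-999" := by
            rw [show (n - 200) / 200 = 3 by omega]; decide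
          simp [pvInnerA, pvBANDS, hidx, h4, show ¬ n ≤ 399 by omega,
            show ¬ n ≤ 599 by omega, show ¬ n ≤ 799 by omega,
            show 200 ≤ n ∧ n ≤ 999 by omega]
        · by_cases h5 : n = 1000
          · simp [pvInnerA, pvBANDS, h5]
          · simp [pvInnerA, pvBANDS, h1, h2, h3, h4, h5,
              show ¬(200 ≤ n ∧ n ≤ 999) by omega, show ¬(1000 ≤ n ∧ n ≤ 1000) by omega]

-- ===== VERDICT (by name: the statement is the Claim_ definition above) =====
theorem band_breakdown_py_spec : Claim_equal_band_breakdown_py := by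
  intro records _ _
  show band_breakdown_py records = band_breakdown_py_alt records
  unfold band_breakdown_py band_breakdown_py_alt
  have hstep : (fun (out : PySem.Dict String Int) (r : List (String × Int)) =>
      match (PySem.Dict.mk r).get? "nota_global" with
      | some n => pvInnerA n out pvBANDS
      | none => out) =
      (fun out r =>
      match (PySem.Dict.mk r).get? "nota_global" with
      | some n =>
          if 200 ≤ n ∧ n ≤ 999 then
            match PySem.List.pyGet? pvNames (PySem.Int.floordiv (n - 200) 200) with
            | some k => out.modify k 0 (· + 1)
            | none => out
          else if n = 1000 then out.modify "1000" 0 (· + 1)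
          else out
      | none => out) := by
    funext out r
    cases (PySem.Dict.mk r).get? "nota_global" with
    | none => rfl
    | some n => exact pv_step_eq out n
  rw [hstep]
  rfl
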